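-- pv_equiv track=rewrite | github.com/clev98/Crypto-Challenges | Set 1/Challenge 3/Single_Byte_XOR_Cipher.py | breakSingleByteXOR
-- ===== SOURCE A (Python) =====
-- def breakSingleByteXOR(binary):
--     strings = []
--
--     for key in range(256):
--         string = ""
--
--         for num in binary:
--             string += chr(num^key)
--
--         strings.append(string)
--
--     return strings
-- ===== SOURCE B (Python) =====
-- def breakSingleByteXOR(binary):
--     if not binary:
--         return [''] * 256
--     # one 256-entry decryption row per DISTINCT value, transpose at C speed, join per key
--     rows = {v: [chr(v ^ key) for key in range(256)] for v in dict.fromkeys(binary)}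
--     return [''.join(col) for col in zip(*(rows[v] for v in binary))]
-- ===== Notes on version B (the rewrite author's own statement) =====
-- stated objective: faster
-- what changed: B precomputes a dict mapping each distinct input value to its 256-entry decryption row and transposes these rows (zip) into the per-key strings with join, instead of A's per-key per-character chr(num^key) concatenation loop (timing: ~6x at n=65536, A timed out at n=262144 where B finished).
import Mathlib
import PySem

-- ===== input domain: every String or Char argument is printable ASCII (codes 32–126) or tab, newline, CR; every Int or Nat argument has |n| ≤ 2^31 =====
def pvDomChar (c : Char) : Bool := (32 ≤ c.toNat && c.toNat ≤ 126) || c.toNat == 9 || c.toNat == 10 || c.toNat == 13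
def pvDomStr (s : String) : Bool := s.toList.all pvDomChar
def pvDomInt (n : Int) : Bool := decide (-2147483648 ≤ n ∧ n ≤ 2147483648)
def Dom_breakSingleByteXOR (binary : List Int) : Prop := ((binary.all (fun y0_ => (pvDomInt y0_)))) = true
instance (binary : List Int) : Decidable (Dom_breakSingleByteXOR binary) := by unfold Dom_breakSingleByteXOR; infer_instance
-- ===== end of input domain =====

-- B precomputes one 256-entry decryption row per DISTINCT input value in a dict and transposes
-- the rows into the per-key strings, instead of A's per-character chr(num^key) concatenation loop.


-- ===== PORT A =====
-- chr(x) is ported as Char.ofNat x.toNat, exact on Pre_ (0 ≤ x < 0x110000, no surrogates).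
def breakSingleByteXOR (binary : List Int) : List String :=
  (PySem.List.pyRange 0 256 1).foldl
    (fun strings key =>
      strings ++
        [binary.foldl
          (fun s num => s ++ String.ofList [Char.ofNat (PySem.Int.bxor num key).toNat]) ""])
    []

-- ===== PORT B =====
-- rows = {v: [chr(v^key) for key in range(256)] for v in dict.fromkeys(binary)};
-- zip(*(rows[v] for v in binary)) yields, for each k < 256 (every row's length), the list of
-- k-th chars of the rows; ''.join of 1-char strings is String.ofList of those chars.
def breakSingleByteXOR_alt (binary : List Int) : List String :=
  if binary = [] then List.replicate 256 "" else
  let rows : PySem.Dict Int (List Char) :=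
    (PySem.List.dedup binary).foldl
      (fun d v =>
        d.insert v ((PySem.List.pyRange 0 256 1).map
          (fun key => Char.ofNat (PySem.Int.bxor v key).toNat)))
      PySem.Dict.empty
  let cols := binary.map (fun v => rows.getD v [])
  ((List.range 256).map (fun k => cols.map (fun row => row.getD k ' '))).map
    (fun col => String.ofList col)

-- ===== PRECONDITION & SPEC =====
-- Pre_ excludes elements outside chr's domain (negative or ≥ 0x110000: A raises ValueError) and
-- the surrogate block 0xD800 ≤ n < 0xE000, where A returns lone-surrogate strings that are not
-- representable as Lean Strings (Char excludes surrogates), so neither port can be faithful there.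
def Pre_breakSingleByteXOR (binary : List Int) : Prop :=
  ∀ n ∈ binary, 0 ≤ n ∧ n < 1114112 ∧ ¬(55296 ≤ n ∧ n < 57344)
instance (binary : List Int) : Decidable (Pre_breakSingleByteXOR binary) := by
  unfold Pre_breakSingleByteXOR; infer_instance
def pvWitness_breakSingleByteXOR : List Int := [72, 101, 108, 108, 111, 33]

def Spec_breakSingleByteXOR (binary : List Int) (out : List String) : Prop :=
  out = breakSingleByteXOR_alt binary
instance (binary : List Int) (out : List String) : Decidable (Spec_breakSingleByteXOR binary out) := by
  unfold Spec_breakSingleByteXOR; infer_instance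

-- ===== CLAIM (what is proved, stated in full; the proofs are below) =====
def Claim_equal_breakSingleByteXOR : Prop :=
  ∀ (binary : List Int), Dom_breakSingleByteXOR binary →
    Pre_breakSingleByteXOR binary →
      Spec_breakSingleByteXOR binary (breakSingleByteXOR binary)

-- ===== LEMMAS AND PROOFS =====

-- A's inner loop: appending one-char strings builds the string of the mapped characters.
theorem foldl_append_char (c : Int → Char) (l : List Int) (acc : List Char) :
    l.foldl (fun s num => s ++ String.ofList [c num]) (String.ofList acc)
      = String.ofList (acc ++ l.map c) := by
  induction l generalizing acc with
  | nil => simp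
  | cons a t ih =>
    simp only [List.foldl_cons, List.map_cons]
    rw [show String.ofList acc ++ String.ofList [c a] = String.ofList (acc ++ [c a]) by simp, ih]
    simp

-- A value-keyed insert loop leaves keys outside the list untouched.
theorem getD_foldl_insert_not_mem {ν : Type} (f : Int → ν) (dflt : ν) (l : List Int)
    (d : PySem.Dict Int ν) (v : Int) (hv : v ∉ l) :
    (l.foldl (fun d x => d.insert x (f x)) d).getD v dflt = d.getD v dflt := by
  induction l generalizing d with
  | nil => rfl
  | cons a t ih =>
    simp only [List.foldl_cons]
    rw [ih _ (fun h => hv (List.mem_cons_of_mem _ h)), PySem.Dict.getD_insert]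
    exact if_neg (by rintro rfl; exact hv List.mem_cons_self)

-- B's dict of rows: looking up any value of the list returns its row.
theorem getD_foldl_insert_mem {ν : Type} (f : Int → ν) (dflt : ν) (l : List Int)
    (d : PySem.Dict Int ν) (v : Int) (hv : v ∈ l) :
    (l.foldl (fun d x => d.insert x (f x)) d).getD v dflt = f v := by
  induction l generalizing d with
  | nil => cases hv
  | cons a t ih =>
    simp only [List.foldl_cons]
    by_cases hvt : v ∈ t
    · exact ih _ hvt
    · have hva : v = a := by cases List.mem_cons.mp hv with
        | inl h => exact h
        | inr h => exact absurd h hvt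
      rw [getD_foldl_insert_not_mem f dflt t _ v hvt, hva, PySem.Dict.getD_insert_self]

-- ===== VERDICT (by name: the statement is the Claim_ definition above) =====
theorem breakSingleByteXOR_spec : Claim_equal_breakSingleByteXOR := by
  intro binary _ _
  unfold Spec_breakSingleByteXOR breakSingleByteXOR breakSingleByteXOR_alt
  rw [PySem.List.foldl_append_singleton_eq_map]
  simp only [List.nil_append]
  by_cases hnil : binary = []
  · subst hnil
    rw [if_pos rfl]
    refine List.eq_replicate_iff.mpr ⟨?_, ?_⟩
    · rw [List.length_map, PySem.List.length_pyRange_one]; decide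
    · intro s hs
      obtain ⟨key, -, rfl⟩ := List.mem_map.mp hs
      rfl
  · rw [if_neg hnil]
    rw [List.map_map]
    refine List.ext_getElem ?_ (fun i h1 h2 => ?_)
    · rw [List.length_map, List.length_map, PySem.List.length_pyRange_one,
        List.length_range]
      decide
    · have hi : i < 256 := by
        simpa using h2
      have hip : i < (PySem.List.pyRange 0 256 1).length := by
        rw [PySem.List.length_pyRange_one]; omega
      rw [List.getElem_map, List.getElem_map, List.getElem_range]
      rw [PySem.List.getElem_pyRange_one]
      have hfold := foldl_append_char
        (fun num => Char.ofNat (PySem.Int.bxor num ((0 : Int) + (i : Int))).toNat) binary []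
      simp only [List.nil_append] at hfold
      show binary.foldl _ (String.ofList []) = _
      rw [hfold]
      congr 1
      beta_reduce
      rw [List.map_map]
      refine List.map_congr_left (fun v hv => ?_)
      have hrow := getD_foldl_insert_mem
        (fun x => (PySem.List.pyRange 0 256 1).map
          (fun key => Char.ofNat (PySem.Int.bxor x key).toNat))
        ([] : List Char) (PySem.List.dedup binary) PySem.Dict.empty v
        ((PySem.List.mem_dedup _ _).mpr hv)
      simp only [Function.comp_apply]
      rw [hrow]
      have hip' : i < ((PySem.List.pyRange 0 256 1).map
          (fun key => Char.ofNat (PySem.Int.bxor v key).toNat)).length := by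
        rw [List.length_map]; exact hip
      rw [List.getD_eq_getElem?_getD, List.getElem?_eq_getElem hip', Option.getD_some,
        List.getElem_map, PySem.List.getElem_pyRange_one]
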